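-- pv_equiv track=rewrite | github.com/mvs22/IC | depth.py | relacionando_regiao
-- ===== SOURCE A (Python) =====
-- def relacionando_regiao(lista):
-- 	listaEs,listaCi,listaCl,listaIn,listaIg = [], [], [], [], []
-- 	valor = 0
-- 	flag = ""
--
-- 	for lis in lista:
-- 		if (lis[1] == 'Escuro'):
-- 			listaEs.append(lis)
-- 			flag = "Escuro"
--
-- 		if(lis[1] == 'Cinza'):
-- 			listaCi.append(lis)
-- 			flag = "Cinza"
--
-- 		if(lis[1] == 'Claro'):
-- 			listaCl.append(lis)
-- 			flag = "Claro"
--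
-- 		if(lis[1] == 'Indefinido'):
-- 			listaIn.append(lis)
-- 			flag = "Indefinido"
--
-- 		if(lis[1] == 'Iguais'):
-- 			listaIg.append(lis)
-- 			flag = "Iguais"
--
-- 	for i in [listaEs,listaCi,listaCl,listaIn,listaIg]:
-- 		try:
-- 			if(i[0][0] == 'P'):
-- 				return len(i)
-- 		except:
-- 			pass
--
-- 	return valor
-- ===== SOURCE B (Python) =====
-- def relacionando_regiao(lista):
--     for cor in ('Escuro', 'Cinza', 'Claro', 'Indefinido', 'Iguais'):
--         sub = [x for x in lista if x[1] == cor]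
--         if sub and sub[0][0] == 'P':
--             return len(sub)
--     return 0
-- ===== Notes on version B (the rewrite author's own statement) =====
-- stated objective: simpler
-- what changed: Replaces A's single-pass construction of five named bucket lists (with a dead flag variable) followed by a try/except scan with five independent filter passes, one per colour, each checked by a plain guard.
import Mathlib
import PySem

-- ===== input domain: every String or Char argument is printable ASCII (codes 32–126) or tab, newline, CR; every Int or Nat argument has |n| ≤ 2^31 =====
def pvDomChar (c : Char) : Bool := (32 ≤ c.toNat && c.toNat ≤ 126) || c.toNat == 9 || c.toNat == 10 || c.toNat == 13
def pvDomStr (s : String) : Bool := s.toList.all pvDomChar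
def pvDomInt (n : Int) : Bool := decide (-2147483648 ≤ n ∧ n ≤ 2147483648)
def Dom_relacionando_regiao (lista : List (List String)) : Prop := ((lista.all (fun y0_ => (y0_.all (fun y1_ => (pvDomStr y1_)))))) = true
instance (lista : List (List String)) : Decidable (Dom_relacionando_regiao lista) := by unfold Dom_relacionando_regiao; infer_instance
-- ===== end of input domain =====

-- B replaces A's single-pass five-bucket accumulation (plus try/except scan) by five
-- independent filters with a plain guard; objective: simpler. Same return value on Pre_.

-- ===== PORT A =====
-- lis[1]; exact on Pre_ (every row has length ≥ 2; elsewhere Python raises IndexError)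
def pvGet1 (lis : List String) : String := (PySem.List.pyGet? lis 1).getD ""

-- state of A's first loop: the five buckets and the (dead) flag
structure PvStA where
  es : List (List String)
  ci : List (List String)
  cl : List (List String)
  ind : List (List String)
  ig : List (List String)
  flag : String

-- one iteration of A's first loop: the five independent `if` statements in order
def pvStepA (st : PvStA) (lis : List String) : PvStA :=
  let st := if pvGet1 lis = "Escuro" then { st with es := st.es ++ [lis], flag := "Escuro" } else st
  let st := if pvGet1 lis = "Cinza" then { st with ci := st.ci ++ [lis], flag := "Cinza" } else st
  let st := if pvGet1 lis = "Claro" then { st with cl := st.cl ++ [lis], flag := "Claro" } else st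
  let st := if pvGet1 lis = "Indefinido" then { st with ind := st.ind ++ [lis], flag := "Indefinido" } else st
  let st := if pvGet1 lis = "Iguais" then { st with ig := st.ig ++ [lis], flag := "Iguais" } else st
  st

-- try: if i[0][0] == 'P': return len(i)  except: pass   (none = no return, exception swallowed)
def pvTryBucket (i : List (List String)) : Option Int :=
  match PySem.List.pyGet? i 0 with
  | none => none                          -- IndexError on i[0], swallowed
  | some row =>
    match PySem.List.pyGet? row 0 with
    | none => none                        -- IndexError on row[0], swallowed
    | some s => if s = "P" then some (Int.ofNat i.length) else none

-- second loop over the five buckets, returning `valor = 0` if no bucket returns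
def pvPick : List (List (List String)) → Int
  | [] => 0
  | i :: rest =>
    match pvTryBucket i with
    | some n => n
    | none => pvPick rest

def relacionando_regiao (lista : List (List String)) : Int :=
  let fin := lista.foldl pvStepA ⟨[], [], [], [], [], ""⟩
  pvPick [fin.es, fin.ci, fin.cl, fin.ind, fin.ig]

-- ===== PORT B =====
-- x[1] / sub[0][0]; exact on Pre_ (every row has length ≥ 2)
def pvSubFor (lista : List (List String)) (cor : String) : List (List String) :=
  lista.filter (fun x => pvGet1 x = cor)

def pvAltGo (lista : List (List String)) : List String → Int
  | [] => 0
  | cor :: rest =>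
    let sub := pvSubFor lista cor
    if sub ≠ [] ∧ ((sub.head?.bind (fun r => PySem.List.pyGet? r 0)).getD "") = "P" then
      Int.ofNat sub.length
    else
      pvAltGo lista rest

def relacionando_regiao_alt (lista : List (List String)) : Int :=
  pvAltGo lista ["Escuro", "Cinza", "Claro", "Indefinido", "Iguais"]

-- ===== PRECONDITION & SPEC =====
-- Pre_ excludes exactly the inputs with a row of length < 2, where A's `lis[1]` raises IndexError.
def Pre_relacionando_regiao (lista : List (List String)) : Prop :=
  ∀ lis ∈ lista, 2 ≤ lis.length
instance (lista : List (List String)) : Decidable (Pre_relacionando_regiao lista) := by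
  unfold Pre_relacionando_regiao; infer_instance

def pvWitness_relacionando_regiao : List (List String) :=
  [["P", "Escuro"], ["x", "Cinza"], ["P", "Cinza"]]

def Spec_relacionando_regiao (lista : List (List String)) (out : Int) : Prop := out = relacionando_regiao_alt lista
instance (lista : List (List String)) (out : Int) : Decidable (Spec_relacionando_regiao lista out) := by unfold Spec_relacionando_regiao; infer_instance

-- ===== CLAIM (what is proved, stated in full; the proofs are below) =====
def Claim_equal_relacionando_regiao : Prop := ∀ (lista : List (List String)), Dom_relacionando_regiao lista → Pre_relacionando_regiao lista → Spec_relacionando_regiao lista (relacionando_regiao lista)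

-- ===== LEMMAS AND PROOFS =====

-- A's fold builds, in each field, exactly the filter of `lista` by that colour.
theorem pvFold_es (lista : List (List String)) (st : PvStA) :
    (lista.foldl pvStepA st).es = st.es ++ pvSubFor lista "Escuro" := by
  induction lista generalizing st with
  | nil => simp [pvSubFor]
  | cons h t ih =>
    simp only [List.foldl_cons, ih, pvSubFor, List.filter_cons]
    simp only [pvStepA]
    split_ifs <;> simp_all

theorem pvFold_ci (lista : List (List String)) (st : PvStA) :
    (lista.foldl pvStepA st).ci = st.ci ++ pvSubFor lista "Cinza" := by
  induction lista generalizing st with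
  | nil => simp [pvSubFor]
  | cons h t ih =>
    simp only [List.foldl_cons, ih, pvSubFor, List.filter_cons]
    simp only [pvStepA]
    split_ifs <;> simp_all

theorem pvFold_cl (lista : List (List String)) (st : PvStA) :
    (lista.foldl pvStepA st).cl = st.cl ++ pvSubFor lista "Claro" := by
  induction lista generalizing st with
  | nil => simp [pvSubFor]
  | cons h t ih =>
    simp only [List.foldl_cons, ih, pvSubFor, List.filter_cons]
    simp only [pvStepA]
    split_ifs <;> simp_all

theorem pvFold_ind (lista : List (List String)) (st : PvStA) :
    (lista.foldl pvStepA st).ind = st.ind ++ pvSubFor lista "Indefinido" := by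
  induction lista generalizing st with
  | nil => simp [pvSubFor]
  | cons h t ih =>
    simp only [List.foldl_cons, ih, pvSubFor, List.filter_cons]
    simp only [pvStepA]
    split_ifs <;> simp_all

theorem pvFold_ig (lista : List (List String)) (st : PvStA) :
    (lista.foldl pvStepA st).ig = st.ig ++ pvSubFor lista "Iguais" := by
  induction lista generalizing st with
  | nil => simp [pvSubFor]
  | cons h t ih =>
    simp only [List.foldl_cons, ih, pvSubFor, List.filter_cons]
    simp only [pvStepA]
    split_ifs <;> simp_all

-- on a bucket whose rows are all nonempty, A's try/except step matches B's guard
theorem pvTry_eq_guard (sub : List (List String)) (k : Int)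
    (h : ∀ r ∈ sub, r ≠ []) :
    (match pvTryBucket sub with | some n => n | none => k) =
      (if sub ≠ [] ∧ ((sub.head?.bind (fun r => PySem.List.pyGet? r 0)).getD "") = "P" then
        Int.ofNat sub.length else k) := by
  cases sub with
  | nil => simp [pvTryBucket, PySem.List.pyGet?]
  | cons r rest =>
    have hr : r ≠ [] := h r (by simp)
    cases r with
    | nil => exact absurd rfl hr
    | cons s rs =>
      simp only [pvTryBucket, PySem.List.pyGet?, PySem.List.pyIdx?]
      simp only [List.head?_cons, Option.bind_some]
      norm_num [PySem.List.pyGet?, PySem.List.pyIdx?]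
      split_ifs <;> simp_all

theorem pvSub_rows_nonempty (lista : List (List String)) (cor : String)
    (hp : Pre_relacionando_regiao lista) :
    ∀ r ∈ pvSubFor lista cor, r ≠ [] := by
  intro r hr
  have hm : r ∈ lista := List.mem_of_mem_filter hr
  have := hp r hm
  intro hnil; simp [hnil] at this

-- ===== VERDICT (by name: the statement is the Claim_ definition above) =====
theorem relacionando_regiao_spec : Claim_equal_relacionando_regiao := by
  intro lista _ hp
  unfold Spec_relacionando_regiao relacionando_regiao relacionando_regiao_alt
  simp only [pvFold_es, pvFold_ci, pvFold_cl, pvFold_ind, pvFold_ig, List.nil_append]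
  simp only [pvPick, pvAltGo]
  rw [pvTry_eq_guard _ _ (pvSub_rows_nonempty lista "Escuro" hp),
      pvTry_eq_guard _ _ (pvSub_rows_nonempty lista "Cinza" hp),
      pvTry_eq_guard _ _ (pvSub_rows_nonempty lista "Claro" hp),
      pvTry_eq_guard _ _ (pvSub_rows_nonempty lista "Indefinido" hp),
      pvTry_eq_guard _ _ (pvSub_rows_nonempty lista "Iguais" hp)]
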